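-- pv_equiv track=rewrite | github.com/zliu53468-ai/DG-TOP | app.py | is_pattern_long_run
-- ===== SOURCE A (Python) =====
-- def is_pattern_long_run(history_slice, min_len=5):
--     """判斷是否為「長龍」：連續出現相同結果（B或P）。"""
--     if len(history_slice) < min_len:
--         return 0
--
--     # 過濾和局，只考慮 B/P 序列
--     filtered_history = [r for r in history_slice if r != 'T']
--     if len(filtered_history) < min_len:
--         return 0
--
--     last_outcome = filtered_history[-1]
--
--     count = 0
--     for i in range(1, len(filtered_history) + 1):
--         if filtered_history[-i] == last_outcome:
--             count += 1
--         else: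
--             break
--     return 1 if count >= min_len else 0
-- ===== SOURCE B (Python) =====
-- def is_pattern_long_run(history_slice, min_len=5):
--     """Long-run check: the trailing min_len non-tie outcomes are all the same."""
--     filtered_history = [r for r in history_slice if r != 'T']
--     if len(history_slice) < min_len or len(filtered_history) < min_len:
--         return 0
--     tail = filtered_history[len(filtered_history) - min_len:]
--     return 1 if all(x == filtered_history[-1] for x in tail) else 0
-- ===== Notes on version B (the rewrite author's own statement) =====
-- stated objective: simpler
-- what changed: Replaces the backward counting loop with a direct check that the trailing min_len-element window of the filtered history is constant, via a slice and all(); no run length is computed.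
-- outside the precondition, e.g. on is_pattern_long_run(['T'], 0): A raises IndexError, B returns 1
-- crash fix: When min_len <= 0 and every element is 'T', A raises IndexError on filtered_history[-1]; B returns 1 (the lazy all() over the empty window never evaluates filtered_history[-1]). — e.g. on is_pattern_long_run(["T"], 0): A raises IndexError, B returns 1
import Mathlib
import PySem

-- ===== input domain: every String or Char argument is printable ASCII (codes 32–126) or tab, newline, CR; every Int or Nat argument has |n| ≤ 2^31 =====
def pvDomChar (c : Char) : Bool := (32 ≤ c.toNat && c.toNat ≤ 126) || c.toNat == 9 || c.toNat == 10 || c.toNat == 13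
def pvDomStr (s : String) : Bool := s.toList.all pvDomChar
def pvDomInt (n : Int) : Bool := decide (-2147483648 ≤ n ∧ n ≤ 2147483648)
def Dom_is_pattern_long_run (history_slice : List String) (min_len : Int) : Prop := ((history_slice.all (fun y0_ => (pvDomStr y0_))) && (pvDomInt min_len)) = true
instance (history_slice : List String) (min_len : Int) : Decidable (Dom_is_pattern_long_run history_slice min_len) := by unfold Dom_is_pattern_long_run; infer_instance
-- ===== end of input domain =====

-- B replaces A's backward counting loop by a direct constant-window check on the trailing
-- min_len elements (objective: simpler).

-- ===== PORT A =====
-- the for/break loop: i runs 1, 2, … while filtered[-i] == last_outcome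
def pvLoopA (filtered : List String) (last : String) (i : Nat) (count : Int) : Int :=
  if i ≤ filtered.length then
    match PySem.List.pyGet? filtered (-(i : Int)) with
    | some v => if v == last then pvLoopA filtered last (i + 1) (count + 1) else count
    | none => count
  else count
termination_by filtered.length + 1 - i

def is_pattern_long_run (history_slice : List String) (min_len : Int) : Int :=
  if (history_slice.length : Int) < min_len then 0
  else
    let filtered := history_slice.filter (fun r => r != "T")
    if (filtered.length : Int) < min_len then 0
    else
      match PySem.List.pyGet? filtered (-1) with
      | none => 0  -- Python raises IndexError here; excluded by Pre_
      | some last_outcome =>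
        if min_len ≤ pvLoopA filtered last_outcome 1 0 then 1 else 0

-- ===== PORT B =====
def is_pattern_long_run_alt (history_slice : List String) (min_len : Int) : Int :=
  let filtered := history_slice.filter (fun r => r != "T")
  if (history_slice.length : Int) < min_len ∨ (filtered.length : Int) < min_len then 0
  else
    let tail := PySem.List.slice filtered (some ((filtered.length : Int) - min_len)) none
    if tail.all (fun x => PySem.List.pyGet? filtered (-1) == some x) then 1 else 0

-- ===== PRECONDITION & SPEC =====
-- Pre_ excludes exactly the inputs where A raises IndexError (min_len ≤ 0 with no non-'T' entry).
def Pre_is_pattern_long_run (history_slice : List String) (min_len : Int) : Prop :=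
  0 < min_len ∨ history_slice.filter (fun r => r != "T") ≠ []
instance (history_slice : List String) (min_len : Int) : Decidable (Pre_is_pattern_long_run history_slice min_len) := by unfold Pre_is_pattern_long_run; infer_instance
def pvWitness_is_pattern_long_run : List String × Int := (["B", "B", "B"], 2)

-- When min_len ≤ 0 and every element is 'T', A raises IndexError on filtered_history[-1];
-- B returns 1 (its all() over the empty trailing window never evaluates filtered_history[-1]).
def Raises_is_pattern_long_run (history_slice : List String) (min_len : Int) : Prop :=
  min_len ≤ 0 ∧ history_slice.filter (fun r => r != "T") = []
instance (history_slice : List String) (min_len : Int) : Decidable (Raises_is_pattern_long_run history_slice min_len) := by unfold Raises_is_pattern_long_run; infer_instance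
def pvRaiseWitness_is_pattern_long_run : List String × Int := (["T"], 0)
def pvRaiseWitnessOut_is_pattern_long_run : Int := 1

def Spec_is_pattern_long_run (history_slice : List String) (min_len : Int) (out : Int) : Prop := out = is_pattern_long_run_alt history_slice min_len
instance (history_slice : List String) (min_len : Int) (out : Int) : Decidable (Spec_is_pattern_long_run history_slice min_len out) := by unfold Spec_is_pattern_long_run; infer_instance

-- ===== CLAIM (what is proved, stated in full; the proofs are below) =====
def Claim_equal_is_pattern_long_run : Prop := ∀ (history_slice : List String) (min_len : Int), Dom_is_pattern_long_run history_slice min_len → Pre_is_pattern_long_run history_slice min_len → Spec_is_pattern_long_run history_slice min_len (is_pattern_long_run history_slice min_len)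
def Claim_raises_is_pattern_long_run : Prop := (∀ (history_slice : List String) (min_len : Int), Dom_is_pattern_long_run history_slice min_len → Raises_is_pattern_long_run history_slice min_len → ¬ Pre_is_pattern_long_run history_slice min_len) ∧ (Dom_is_pattern_long_run (pvRaiseWitness_is_pattern_long_run.1) (pvRaiseWitness_is_pattern_long_run.2) ∧ Raises_is_pattern_long_run (pvRaiseWitness_is_pattern_long_run.1) (pvRaiseWitness_is_pattern_long_run.2) ∧ is_pattern_long_run_alt (pvRaiseWitness_is_pattern_long_run.1) (pvRaiseWitness_is_pattern_long_run.2) = pvRaiseWitnessOut_is_pattern_long_run)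

-- ===== LEMMAS AND PROOFS =====

-- A's loop computes the length of the trailing run (takeWhile on the reversed list).
theorem pvLoopA_eq (f : List String) (last : String) :
    ∀ (k i : Nat) (c : Int), f.length + 1 - i = k → 1 ≤ i →
    pvLoopA f last i c = c + (((f.reverse.drop (i - 1)).takeWhile (· == last)).length : Int) := by
  intro k
  induction k with
  | zero =>
    intro i c hk hi
    rw [pvLoopA, if_neg (by omega)]
    rw [List.drop_eq_nil_of_le (by simp; omega)]
    simp
  | succ k ih =>
    intro i c hk hi
    have hil : i ≤ f.length := by omega
    have hlt : i - 1 < f.length := by omega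
    rw [pvLoopA, if_pos hil]
    rw [PySem.List.pyGet?_neg_natCast f i (by omega) hil]
    have hgl : f.length - i < f.length := by omega
    rw [List.getElem?_eq_getElem hgl]
    have hdrop : f.reverse.drop (i - 1) = f[f.length - i] :: f.reverse.drop i := by
      rw [List.drop_eq_getElem_cons (by simpa using hlt)]
      congr 1
      · rw [List.getElem_reverse]
        congr 1
        omega
      · congr 1
        omega
    rw [hdrop, List.takeWhile_cons]
    by_cases hv : (f[f.length - i] == last) = true
    · rw [ih (i + 1) (c + 1) (by omega) (by omega)]
      have h11 : i + 1 - 1 = i := by omega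
      rw [h11]
      simp only [hv, if_true, List.length_cons]
      push_cast
      ring
    · rw [Bool.not_eq_true] at hv
      simp [hv]

-- window check ↔ run length bound
theorem take_all_iff_takeWhile (r : List String) (p : String → Bool) :
    ∀ m : Nat, m ≤ r.length → ((r.take m).all p = true ↔ m ≤ (r.takeWhile p).length) := by
  induction r with
  | nil => intro m hm; simp at hm; simp [hm]
  | cons a t ih =>
    intro m hm
    cases m with
    | zero => simp
    | succ m =>
      rw [List.take_succ_cons, List.takeWhile_cons]
      by_cases hpa : p a = true
      · simp only [hpa, if_true, List.all_cons, List.length_cons]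
        rw [Bool.and_eq_true]
        constructor
        · rintro ⟨_, h⟩
          have := (ih m (by simpa using hm)).mp h
          omega
        · intro h
          exact ⟨by simp, (ih m (by simpa using hm)).mpr (by omega)⟩
      · rw [Bool.not_eq_true] at hpa
        simp [hpa]

-- ===== VERDICT (by name: the statement is the Claim_ definition above) =====
theorem is_pattern_long_run_raises : Claim_raises_is_pattern_long_run := by
  unfold Claim_raises_is_pattern_long_run
  constructor
  · intro hs m _ hr hp
    obtain ⟨h1, h2⟩ := hr
    rcases hp with hp | hp
    · omega
    · exact hp h2
  · exact ⟨by decide, by decide, by decide⟩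

theorem is_pattern_long_run_spec : Claim_equal_is_pattern_long_run := by
  intro hs m hdom hpre
  unfold Spec_is_pattern_long_run
  unfold is_pattern_long_run is_pattern_long_run_alt
  set f := hs.filter (fun r => r != "T") with hf
  by_cases h1 : (hs.length : Int) < m
  · simp [h1]
  by_cases h2 : (f.length : Int) < m
  · simp [h1, h2]
  -- both guards pass
  have hne : f ≠ [] := by
    -- if f were empty we would be in the excluded IndexError region
    intro hnil
    have hm0 : m ≤ 0 := by
      rw [hnil] at h2
      simp at h2
      omega
    exact is_pattern_long_run_raises.1 hs m hdom ⟨hm0, hf ▸ hnil⟩ hpre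
  have hlast : PySem.List.pyGet? f (-1) = some (f.getLast hne) := by
    rw [PySem.List.pyGet?_neg_one, List.getLast?_eq_some_getLast]
  set last := f.getLast hne with hl
  simp only [if_neg h1, if_neg h2, hlast,
    if_neg (by tauto : ¬((hs.length : Int) < m ∨ (f.length : Int) < m))]
  rw [pvLoopA_eq f last (f.length + 1 - 1) 1 0 rfl (by omega)]
  simp only [Nat.sub_self, List.drop_zero, Int.zero_add]
  by_cases hm0 : m ≤ 0
  · -- run-length branch trivially true; B's window is empty
    rw [if_pos (by omega)]
    have harg : (f.length : Int) - m = ((f.length + (-m).toNat : Nat) : Int) := by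
      omega
    rw [harg, PySem.List.slice_some_none, PySem.List.clampIdx_natCast]
    rw [Nat.min_eq_right (by omega), List.drop_length]
    simp
  · -- 0 < m: window of size m
    have hmk : m.toNat ≤ f.length := by omega
    have harg : (f.length : Int) - m = ((f.length - m.toNat : Nat) : Int) := by
      omega
    rw [harg, PySem.List.slice_some_none, PySem.List.clampIdx_natCast]
    rw [Nat.min_eq_left (by omega)]
    have hdrop : f.drop (f.length - m.toNat) = (f.reverse.take m.toNat).reverse := by
      rw [List.take_reverse, List.reverse_reverse]
    rw [hdrop, List.all_reverse]
    have hiff := take_all_iff_takeWhile f.reverse (fun x => x == last) m.toNat (by simpa using hmk)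
    have hpred : ∀ x : String, (some last == some x) = (x == last) := by
      intro x
      simp [eq_comm]
    simp only [hpred]
    by_cases hall : ((f.reverse.take m.toNat).all fun x => x == last) = true
    · rw [if_pos hall, if_pos (by have := hiff.mp hall; omega)]
    · rw [if_neg hall]
      rw [if_neg]
      intro hle
      exact hall (hiff.mpr (by omega))
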